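-- pv_equiv track=rewrite | github.com/naykun/MusicResearch | Polyphony_Dataset_Convertor/Poly_Music_Playground.py | get_melody
-- ===== SOURCE A (Python) =====
-- def get_melody(events):
--     ret = []
--     for i, event in enumerate(events):
--         if event==2:
--             pass
--             #ret.append(event)
--         else:
--             if i>0 and events[i-1]==2:
--                 ret.append([event])
--     return ret
-- ===== SOURCE B (Python) =====
-- def get_melody(events):
--     # Split events on the delimiter 2; each post-delimiter segment's first
--     # element (if any) is a melody note.
--     segments = []
--     cur = []
--     for e in events:
--         if e == 2:
--             segments.append(cur)
--             cur = []
--         else: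
--             cur.append(e)
--     segments.append(cur)
--     return [[seg[0]] for seg in segments[1:] if seg]
-- ===== Notes on version B (the rewrite author's own statement) =====
-- stated objective: alternative
-- what changed: A makes one pass checking each element's predecessor; B splits the event list into segments on the delimiter 2 and then emits the first element of each nonempty post-delimiter segment.
import Mathlib
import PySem

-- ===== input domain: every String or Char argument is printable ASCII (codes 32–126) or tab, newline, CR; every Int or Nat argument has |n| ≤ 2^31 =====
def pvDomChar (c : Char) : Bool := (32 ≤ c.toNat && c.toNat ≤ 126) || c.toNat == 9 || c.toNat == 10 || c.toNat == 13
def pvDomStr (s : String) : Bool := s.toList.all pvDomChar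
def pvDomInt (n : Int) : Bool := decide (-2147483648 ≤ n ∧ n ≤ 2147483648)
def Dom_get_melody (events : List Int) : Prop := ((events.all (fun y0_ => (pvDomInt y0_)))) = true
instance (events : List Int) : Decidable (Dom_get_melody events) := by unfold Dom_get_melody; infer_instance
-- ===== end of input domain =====

-- B replaces A's single predecessor-checking pass by a split-on-delimiter algorithm:
-- split the events on 2 into segments, then emit the head of each nonempty
-- post-delimiter segment (alternative decomposition, same cost).


-- ===== PORT A =====
-- for i, event in enumerate(events): if event==2: pass else: if i>0 and events[i-1]==2: ret.append([event])
def get_melody (events : List Int) : List (List Int) :=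
  (PySem.List.enumerate events 0).foldl
    (fun ret ie =>
      if ie.2 = 2 then ret
      else if 0 < ie.1 ∧ PySem.List.pyGetD events (ie.1 - 1) 0 = 2 then ret ++ [[ie.2]]
      else ret) []

-- ===== PORT B =====
-- split events on the delimiter 2 into segments, then [[seg[0]] for seg in segments[1:] if seg]
def get_melody_alt (events : List Int) : List (List Int) :=
  let p := events.foldl
    (fun (sc : List (List Int) × List Int) e =>
      if e = 2 then (sc.1 ++ [sc.2], ([] : List Int)) else (sc.1, sc.2 ++ [e]))
    ([], [])
  ((p.1 ++ [p.2]).drop 1).filterMap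
    (fun seg => match seg with | [] => none | x :: _ => some [x])

-- ===== PRECONDITION & SPEC =====
def Spec_get_melody (events : List Int) (out : List (List Int)) : Prop := out = get_melody_alt events
instance (events : List Int) (out : List (List Int)) : Decidable (Spec_get_melody events out) := by unfold Spec_get_melody; infer_instance

-- ===== CLAIM (what is proved, stated in full; the proofs are below) =====
def Claim_equal_get_melody : Prop := ∀ (events : List Int), Dom_get_melody events → Spec_get_melody events (get_melody events)

-- ===== LEMMAS AND PROOFS =====

-- the common value: [[y]] for each adjacent pair (2, y) with y ≠ 2
def pvPairs : List Int → List (List Int)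
  | [] => []
  | [_] => []
  | x :: y :: xs => (if x = 2 ∧ y ≠ 2 then [[y]] else []) ++ pvPairs (y :: xs)

lemma pvA_gen (events : List Int) : ∀ (suf pre : List Int) (acc : List (List Int)),
    events = pre ++ suf →
    (PySem.List.enumerate suf (pre.length : Int)).foldl
      (fun ret ie =>
        if ie.2 = 2 then ret
        else if 0 < ie.1 ∧ PySem.List.pyGetD events (ie.1 - 1) 0 = 2 then ret ++ [[ie.2]]
        else ret) acc
    = acc ++ (match pre.getLast? with
              | some v => pvPairs (v :: suf)
              | none => pvPairs suf) := by
  intro suf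
  induction suf with
  | nil =>
    intro pre acc h
    rcases pre.eq_nil_or_concat with rfl | ⟨q, v, rfl⟩ <;>
      simp [PySem.List.enumerate_nil, pvPairs]
  | cons x xs ih =>
    intro pre acc h
    rw [PySem.List.enumerate_cons, List.foldl_cons]
    have hstep :
        (if x = 2 then acc
         else if 0 < (pre.length : Int) ∧ PySem.List.pyGetD events ((pre.length : Int) - 1) 0 = 2
           then acc ++ [[x]] else acc)
        = acc ++ (match pre.getLast? with
                  | some v => if v = 2 ∧ x ≠ 2 then [[x]] else []
                  | none => []) := by
      rcases pre.eq_nil_or_concat with rfl | ⟨q, v, rfl⟩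
      · simp
      · simp only [List.concat_eq_append] at h ⊢
        have hcast1 : ((q ++ [v]).length : Int) - 1 = ((q.length : Nat) : Int) := by
          simp
        have hget : PySem.List.pyGetD events (((q ++ [v]).length : Int) - 1) 0 = v := by
          rw [hcast1, PySem.List.pyGetD_natCast]
          subst h
          simp [List.getD_eq_getElem?_getD]
        rw [hget]
        by_cases hx : x = 2 <;> by_cases hv : v = 2 <;>
          simp [hx, hv]
    rw [hstep]
    have hcast : ((pre.length : Int) + 1) = (((pre ++ [x]).length : Nat) : Int) := by
      simp
    rw [hcast, ih (pre ++ [x]) _ (by simp [h]), List.getLast?_concat]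
    rcases pre.eq_nil_or_concat with rfl | ⟨q, v, rfl⟩
    · cases xs <;> simp [pvPairs]
    · simp only [List.concat_eq_append, List.getLast?_concat]
      cases xs <;> simp [pvPairs]

-- heads of all segments but the first (= B's final comprehension)
def pvTailHeads (l : List (List Int)) : List (List Int) :=
  (l.drop 1).filterMap (fun seg => match seg with | [] => none | x :: _ => some [x])

def pvHeadOpt : List Int → List (List Int)
  | [] => []
  | x :: _ => [[x]]

lemma pvTailHeads_concat (l : List (List Int)) (s : List Int) :
    pvTailHeads (l ++ [s]) = pvTailHeads l ++ (if l = [] then [] else pvHeadOpt s) := by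
  cases l with
  | nil => cases s <;> simp [pvTailHeads]
  | cons a l' =>
    simp only [pvTailHeads, List.cons_append, List.drop_succ_cons, List.drop_zero,
      List.filterMap_append, if_neg (List.cons_ne_nil a l')]
    cases s <;> simp [pvHeadOpt]

-- the split-fold invariant
lemma pvB_gen : ∀ (suf : List Int) (segs : List (List Int)) (cur : List Int),
    pvTailHeads ((suf.foldl
        (fun (sc : List (List Int) × List Int) e =>
          if e = 2 then (sc.1 ++ [sc.2], ([] : List Int)) else (sc.1, sc.2 ++ [e]))
        (segs, cur)).1 ++ [(suf.foldl
        (fun (sc : List (List Int) × List Int) e =>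
          if e = 2 then (sc.1 ++ [sc.2], ([] : List Int)) else (sc.1, sc.2 ++ [e]))
        (segs, cur)).2])
    = pvTailHeads (segs ++ [cur]) ++
      (if segs = [] ∨ cur ≠ [] then [] else
        match suf with
        | [] => []
        | y :: _ => if y = 2 then [] else [[y]]) ++ pvPairs suf := by
  intro suf
  induction suf with
  | nil =>
    intro segs cur
    simp [pvPairs]
  | cons e xs ih =>
    intro segs cur
    rw [List.foldl_cons]
    by_cases he : e = 2
    · subst he
      rw [if_pos rfl, ih (segs ++ [cur]) []]
      have h1 : pvTailHeads (segs ++ [cur] ++ [[]]) = pvTailHeads (segs ++ [cur]) := by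
        rw [pvTailHeads_concat]
        simp [pvHeadOpt]
      rw [h1]
      have h2 : ¬(segs ++ [cur] = [] ∨ ([] : List Int) ≠ []) := by simp
      rw [if_neg h2]
      cases xs with
      | nil => simp [pvPairs]
      | cons y ys =>
        by_cases hy : y = 2 <;> simp [pvPairs, hy]
    · rw [if_neg he, ih segs (cur ++ [e])]
      have hpp : pvPairs (e :: xs) = pvPairs xs := by
        cases xs with
        | nil => simp [pvPairs]
        | cons y ys => simp [pvPairs, he]
      rw [hpp, if_pos (show segs = [] ∨ cur ++ [e] ≠ [] from Or.inr (by simp)),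
        pvTailHeads_concat, pvTailHeads_concat]
      by_cases hs : segs = []
      · simp [hs]
      · rw [if_neg hs, if_neg hs]
        have hho : pvHeadOpt (cur ++ [e]) = pvHeadOpt cur ++
            (if cur = [] then [[e]] else []) := by
          cases cur <;> simp [pvHeadOpt]
        rw [hho]
        by_cases hc : cur = []
        · simp [hc, hs, pvHeadOpt, he]
        · simp [hc, hs]

-- ===== VERDICT (by name: the statement is the Claim_ definition above) =====
theorem get_melody_spec : Claim_equal_get_melody := by
  intro events _
  unfold Spec_get_melody get_melody get_melody_alt
  have hA := pvA_gen events events [] [] rfl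
  have hB := pvB_gen events [] []
  simp only [List.length_nil, Nat.cast_zero, List.getLast?_nil, List.nil_append] at hA
  rw [hA]
  rw [if_pos (Or.inl rfl)] at hB
  show _ = pvTailHeads _
  rw [hB]
  simp [pvTailHeads]
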